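-- pv_equiv track=rewrite | github.com/SteveImmanuel/code-practice | 0823-binary-trees-with-factors/0823-binary-trees-with-factors.py | calculate
-- ===== SOURCE A (Python) =====
-- def calculate(idx, arr, mem):
--     MOD = 1000000007
--     if arr[idx] not in mem:
--         total = 1
--         for i in range(idx):
--             div, mod = divmod(arr[idx], arr[i])
--             if mod == 0:
--                 variants = mem[div] * mem[arr[i]]
--                 total += variants % MOD
--         mem[arr[idx]] = total % MOD
--     return mem[arr[idx]]
-- ===== SOURCE B (Python) =====
-- def calculate(idx, arr, mem):
--     # Like A this memoizes into mem (same mutation); equivalence is about the return value.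
--     MOD = 1000000007
--     v = arr[idx]
--     if v in mem:
--         return mem[v]
--     total = 1
--     if v == 0:
--         # every nonzero earlier element divides 0, with quotient 0
--         for i in range(idx):
--             x = arr[i]
--             if x != 0:
--                 total += (mem[0] * mem[x]) % MOD
--     else:
--         cnt = {}
--         for i in range(idx):
--             x = arr[i]
--             cnt[x] = cnt.get(x, 0) + 1
--         a = -v if v < 0 else v
--         d = 1
--         while d * d <= a:
--             if a % d == 0:
--                 q = a // d
--                 for x in ([d, -d] if q == d else [d, -d, q, -q]):
--                     if x in cnt:
--                         total += cnt[x] * ((mem[v // x] * mem[x]) % MOD)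
--             d += 1
--     mem[v] = total % MOD
--     return mem[v]
-- ===== Notes on version B (the rewrite author's own statement) =====
-- stated objective: alternative
-- what changed: A scans all idx predecessors testing each with divmod; B builds a counter of the prefix once and enumerates the divisors of arr[idx] in signed factor pairs up to sqrt(|arr[idx]|), adding count * memo-product per distinct divisor (special-casing arr[idx] == 0, which every nonzero predecessor divides).
import Mathlib
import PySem

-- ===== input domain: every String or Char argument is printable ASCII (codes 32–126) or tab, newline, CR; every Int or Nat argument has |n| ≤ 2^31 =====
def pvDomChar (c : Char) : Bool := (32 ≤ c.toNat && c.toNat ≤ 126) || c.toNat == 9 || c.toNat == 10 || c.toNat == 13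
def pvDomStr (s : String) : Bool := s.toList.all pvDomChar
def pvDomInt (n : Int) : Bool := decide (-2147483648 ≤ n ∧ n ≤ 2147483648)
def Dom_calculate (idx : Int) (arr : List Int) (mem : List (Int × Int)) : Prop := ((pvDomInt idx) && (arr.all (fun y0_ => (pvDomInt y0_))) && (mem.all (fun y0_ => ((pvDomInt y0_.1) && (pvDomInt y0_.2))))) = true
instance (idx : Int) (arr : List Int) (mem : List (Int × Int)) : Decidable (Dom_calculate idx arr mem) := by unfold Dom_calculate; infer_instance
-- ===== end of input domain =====

-- B replaces A's scan over all idx predecessors by a counter of the prefix plus a √-enumeration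
-- of the signed divisor pairs of arr[idx] (objective: alternative algorithm, not claimed faster).
-- Both Pythons memoize into mem the same way; the equivalence proved here is about the return value.

-- ===== PORT A =====
-- helper naming the inline body of A's 'for i in range(idx)' loop
def pvBodyA (m : PySem.Dict Int Int) (MOD v : Int) (total x : Int) : Int :=
  match PySem.Int.divmod? v x with
  | none => total                      -- ZeroDivisionError (excluded by Pre_)
  | some dm =>
    if dm.2 = 0 then
      total + PySem.Int.mod (PySem.Dict.getD m dm.1 0 * PySem.Dict.getD m x 0) MOD
    else total

def calculate (idx : Int) (arr : List Int) (mem : List (Int × Int)) : Int :=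
  let MOD : Int := 1000000007
  let m := PySem.Dict.mk mem
  match PySem.List.pyGet? arr idx with
  | none => 0                          -- IndexError (excluded by Pre_)
  | some v =>
    let m1 :=
      if m.contains v = false then
        let total := (PySem.List.pyRange 0 idx 1).foldl
          (fun total i =>
            match PySem.List.pyGet? arr i with
            | none => total
            | some x => pvBodyA m MOD v total x) 1
        m.insert v (PySem.Int.mod total MOD)
      else m
    m1.getD v 0                        -- KeyError inside the loop excluded by Pre_

-- ===== PORT B =====
-- B's 'if x in cnt: total += cnt[x] * ((mem[v // x] * mem[x]) % MOD)' step
def pvAddDiv (cnt m : PySem.Dict Int Int) (MOD v : Int) (t x : Int) : Int :=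
  if cnt.contains x = true then
    t + cnt.getD x 0 *
      (PySem.Int.mod (PySem.Dict.getD m (PySem.Int.floordiv v x) 0 * PySem.Dict.getD m x 0) MOD)
  else t

-- B's 'while d * d <= a' loop, ported with a structural fuel argument that merely makes the
-- recursion total: calculate_alt passes fuel (a+1).toNat, which never runs out (d starts at 1
-- and increases, and the loop stops once d * d > a), so the guard 'd * d <= a' is Python's.
def pvSqrtLoopB (cnt m : PySem.Dict Int Int) (MOD v a : Int) : Nat → Int → Int → Int
  | 0, _, t => t
  | Nat.succ fuel, d, t =>
    if d * d ≤ a then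
      let t1 :=
        if PySem.Int.mod a d = 0 then
          let q := PySem.Int.floordiv a d
          (if q = d then [d, -d] else [d, -d, q, -q]).foldl (pvAddDiv cnt m MOD v) t
        else t
      pvSqrtLoopB cnt m MOD v a fuel (d + 1) t1
    else t

def calculate_alt (idx : Int) (arr : List Int) (mem : List (Int × Int)) : Int :=
  let MOD : Int := 1000000007
  let m := PySem.Dict.mk mem
  match PySem.List.pyGet? arr idx with
  | none => 0                          -- IndexError (excluded by Pre_)
  | some v =>
    match m.get? v with
    | some r => r
    | none =>
      let total :=
        if v = 0 then
          (PySem.List.pyRange 0 idx 1).foldl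
            (fun t i =>
              match PySem.List.pyGet? arr i with
              | none => t
              | some x =>
                if x ≠ 0 then
                  t + PySem.Int.mod (PySem.Dict.getD m 0 0 * PySem.Dict.getD m x 0) MOD
                else t) 1
        else
          let cnt := (PySem.List.pyRange 0 idx 1).foldl
            (fun c i =>
              match PySem.List.pyGet? arr i with
              | none => c
              | some x => c.insert x (c.getD x 0 + 1)) (PySem.Dict.empty : PySem.Dict Int Int)
          let a := if v < 0 then -v else v
          pvSqrtLoopB cnt m MOD v a (a + 1).toNat 1 1
      (m.insert v (PySem.Int.mod total MOD)).getD v 0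

-- ===== PRECONDITION & SPEC =====
-- Python's index for arr[idx] (wrapped when negative)
def pvJ (idx : Int) (arr : List Int) : Nat :=
  (if 0 ≤ idx then idx else idx + (arr.length : Int)).toNat

-- Pre_ excludes exactly the inputs on which A raises: idx out of range (IndexError), and — when
-- arr[idx] is not yet memoized — a zero among the first idx elements (ZeroDivisionError) or a
-- dividing element whose memo keys mem[arr[idx]//x] / mem[x] are absent (KeyError).
def Pre_calculate (idx : Int) (arr : List Int) (mem : List (Int × Int)) : Prop :=
  -(arr.length : Int) ≤ idx ∧ idx < (arr.length : Int) ∧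
  ((PySem.Dict.get? (PySem.Dict.mk mem) (arr.getD (pvJ idx arr) 0)).isSome = true ∨
   ∀ x ∈ arr.take idx.toNat, x ≠ 0 ∧
     (PySem.Int.mod (arr.getD (pvJ idx arr) 0) x = 0 →
       (PySem.Dict.get? (PySem.Dict.mk mem) (arr.getD (pvJ idx arr) 0 / x)).isSome = true ∧
       (PySem.Dict.get? (PySem.Dict.mk mem) x).isSome = true))
instance (idx : Int) (arr : List Int) (mem : List (Int × Int)) : Decidable (Pre_calculate idx arr mem) := by
  unfold Pre_calculate; infer_instance

def pvWitness_calculate : Int × List Int × (List (Int × Int)) := (1, [2, 4], [(2, 1)])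

def Spec_calculate (idx : Int) (arr : List Int) (mem : List (Int × Int)) (out : Int) : Prop := out = calculate_alt idx arr mem
instance (idx : Int) (arr : List Int) (mem : List (Int × Int)) (out : Int) : Decidable (Spec_calculate idx arr mem out) := by unfold Spec_calculate; infer_instance

-- ===== CLAIM (what is proved, stated in full; the proofs are below) =====
def Claim_equal_calculate : Prop := ∀ (idx : Int) (arr : List Int) (mem : List (Int × Int)), Dom_calculate idx arr mem → Pre_calculate idx arr mem → Spec_calculate idx arr mem (calculate idx arr mem)

-- ===== LEMMAS AND PROOFS =====

-- contribution of one divisor value w (A's mem[v//w] * mem[w] % MOD, with exact quotient v / w)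
def pvF (m : PySem.Dict Int Int) (MOD v w : Int) : Int :=
  PySem.Int.mod (PySem.Dict.getD m (v / w) 0 * PySem.Dict.getD m w 0) MOD

-- B's conditional contribution of one candidate divisor x
def pvg (cnt m : PySem.Dict Int Int) (MOD v x : Int) : Int :=
  if cnt.contains x = true then
    cnt.getD x 0 *
      (PySem.Int.mod (PySem.Dict.getD m (PySem.Int.floordiv v x) 0 * PySem.Dict.getD m x 0) MOD)
  else 0

lemma pvAddDiv_eq (cnt m : PySem.Dict Int Int) (MOD v t x : Int) :
    pvAddDiv cnt m MOD v t x = t + pvg cnt m MOD v x := by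
  unfold pvAddDiv pvg
  split_ifs <;> ring

-- Python floor division is the exact quotient on exact divisions
lemma pvFloordiv_exact (v x : Int) (hx : x ≠ 0) (h : x ∣ v) :
    PySem.Int.floordiv v x = v / x := by
  obtain ⟨k, rfl⟩ := h
  have hm : PySem.Int.mod (x * k) x = 0 :=
    (PySem.Int.mod_eq_zero_iff_dvd (x * k) x).mpr ⟨k, rfl⟩
  have hfm := PySem.Int.floordiv_mul_add_mod (x * k) x
  rw [hm, add_zero] at hfm
  have hk : PySem.Int.floordiv (x * k) x = k := by
    have : PySem.Int.floordiv (x * k) x * x = k * x := by rw [hfm]; ring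
    exact mul_right_cancel₀ hx this
  rw [hk, Int.mul_ediv_cancel_left k hx]

-- A's loop body adds pvF for divisors of v, 0 otherwise
lemma pvBodyA_eq (m : PySem.Dict Int Int) (MOD v : Int) (t x : Int) (hx : x ≠ 0) :
    pvBodyA m MOD v t x = t + (if x ∣ v then pvF m MOD v x else 0) := by
  unfold pvBodyA
  have hb : PySem.Int.divmod? v x
      = some (PySem.Int.floordiv v x, PySem.Int.mod v x) := by
    simp [PySem.Int.divmod?, hx, PySem.Int.floordiv, PySem.Int.mod]
  rw [hb]
  by_cases hd : x ∣ v
  · have hm : PySem.Int.mod v x = 0 := (PySem.Int.mod_eq_zero_iff_dvd v x).mpr hd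
    have hfd := pvFloordiv_exact v x hx hd
    simp [hm, hd, hfd, pvF]
  · have hm : PySem.Int.mod v x ≠ 0 :=
      fun h => hd ((PySem.Int.mod_eq_zero_iff_dvd v x).mp h)
    simp [hm, hd]

-- A's fold over the prefix is t + a sum over the prefix list
lemma pvFoldA_sum (m : PySem.Dict Int Int) (MOD v : Int) :
    ∀ (P : List Int) (t : Int), (∀ x ∈ P, x ≠ 0) →
      P.foldl (pvBodyA m MOD v) t
        = t + (P.map (fun x => if x ∣ v then pvF m MOD v x else 0)).sum := by
  intro P
  induction P with
  | nil => intro t _; simp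
  | cons x P ih =>
    intro t hP
    have hx := hP x (by simp)
    simp only [List.foldl_cons, List.map_cons, List.sum_cons]
    rw [ih _ (fun y hy => hP y (by simp [hy])), pvBodyA_eq m MOD v t x hx]
    ring

-- for v = 0 both loop bodies agree on nonzero elements
lemma pvFoldZero (m : PySem.Dict Int Int) (MOD : Int) :
    ∀ (P : List Int) (t : Int), (∀ x ∈ P, x ≠ 0) →
      P.foldl
        (fun t x =>
          if x ≠ 0 then
            t + PySem.Int.mod (PySem.Dict.getD m 0 0 * PySem.Dict.getD m x 0) MOD
          else t) t
        = P.foldl (pvBodyA m MOD 0) t := by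
  intro P
  induction P with
  | nil => intro t _; rfl
  | cons x P ih =>
    intro t hP
    have hx := hP x (by simp)
    simp only [List.foldl_cons]
    rw [ih _ (fun y hy => hP y (by simp [hy]))]
    congr 1
    rw [pvBodyA_eq m MOD 0 t x hx, if_pos hx, if_pos (dvd_zero x)]
    unfold pvF
    rw [Int.zero_ediv]

-- fold over range n reading arr[k] = fold over take n arr
lemma pvFoldRange {β : Type} (xs : List Int) (g : β → Int → β) :
    ∀ (n : Nat), n ≤ xs.length → ∀ (init : β),
      (List.range n).foldl
        (fun acc k => match xs[k]? with | none => acc | some x => g acc x) init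
        = (xs.take n).foldl g init := by
  intro n
  induction n with
  | zero => intro _ init; simp
  | succ n ih =>
    intro hn init
    have hx : xs[n]? = some xs[n] := List.getElem?_eq_getElem (by omega)
    rw [List.range_succ, List.foldl_append, ih (by omega) init, List.take_add_one, hx,
      List.foldl_append]
    simp [hx]

-- both ports' folds over range(idx) are folds over the prefix take idx.toNat (empty when idx ≤ 0)
lemma pvFoldPrefix {β : Type} (arr : List Int) (idx : Int) (h : idx ≤ (arr.length : Int))
    (g : β → Int → β) (init : β) :
    (PySem.List.pyRange 0 idx 1).foldl
      (fun acc i => match PySem.List.pyGet? arr i with | none => acc | some x => g acc x) init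
      = (arr.take idx.toNat).foldl g init := by
  by_cases hnn : 0 ≤ idx
  · have hidx : idx = ((idx.toNat : Nat) : Int) := by omega
    conv_lhs => rw [hidx]
    rw [PySem.List.pyRange_zero_natCast, List.foldl_map]
    simp only [PySem.List.pyGet?_natCast]
    exact pvFoldRange arr g idx.toNat (by omega) init
  · rw [PySem.List.pyRange_one_eq_nil (by omega), Int.toNat_of_nonpos (by omega)]
    simp

-- the positive divisors of a still to be visited by the √-loop from step d on
noncomputable def pvS (a d : Int) : Finset Int :=
  (Finset.Icc 1 a).filter (fun w => w ∣ a ∧ d ≤ w ∧ d ≤ a / w)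

lemma pvS_mem (a d w : Int) :
    w ∈ pvS a d ↔ (1 ≤ w ∧ w ≤ a) ∧ w ∣ a ∧ d ≤ w ∧ d ≤ a / w := by
  unfold pvS
  simp [Finset.mem_filter, Finset.mem_Icc]

-- once d * d > a no positive divisor w of a has d ≤ w and d ≤ a / w
lemma pvS_empty (a d : Int) (hd : 1 ≤ d) (hdd : ¬ d * d ≤ a) : pvS a d = ∅ := by
  rw [Finset.eq_empty_iff_forall_notMem]
  intro w hw
  obtain ⟨⟨hw1, hwv⟩, hwdvd, hw2, hw3⟩ := (pvS_mem a d w).mp hw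
  have h1 : d * d ≤ w * (a / w) := mul_le_mul hw2 hw3 (by omega) (by omega)
  rw [Int.mul_ediv_cancel' hwdvd] at h1
  omega

-- the √-loop from step d adds pvg x + pvg (-x) over the positive divisors x in pvS a d
lemma pvSqrtLoopB_sum (cnt m : PySem.Dict Int Int) (MOD v a : Int) (ha : 1 ≤ a) :
    ∀ (fuel : Nat) (d total : Int), 1 ≤ d → (a + 1 - d).toNat ≤ fuel →
      pvSqrtLoopB cnt m MOD v a fuel d total
        = total + ∑ w ∈ pvS a d, (pvg cnt m MOD v w + pvg cnt m MOD v (-w)) := by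
  intro fuel
  induction fuel with
  | zero =>
    intro d total hd hn
    have hdd : ¬ d * d ≤ a := by
      have h1 : d ≤ d * d := le_mul_of_one_le_left (by omega) hd
      omega
    rw [pvSqrtLoopB, pvS_empty a d hd hdd]
    simp
  | succ fuel ih =>
    intro d total hd hn
    rw [pvSqrtLoopB]
    by_cases hdd : d * d ≤ a
    · -- guard holds
      have hdv : d ≤ a := le_trans (le_mul_of_one_le_left (by omega) hd) hdd
      rw [if_pos hdd]
      have hq : PySem.Int.floordiv a d = a / d :=
        PySem.Int.floordiv_eq_ediv_of_pos (by omega)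
      have hdle : d ≤ a / d := (Int.le_ediv_iff_mul_le (by omega)).mpr hdd
      by_cases hdvd : d ∣ a
      · -- d divides a: the loop visits the divisor pair (d, a / d)
        have hm0 : PySem.Int.mod a d = 0 := (PySem.Int.mod_eq_zero_iff_dvd a d).mpr hdvd
        have hmul : a / d * d = a := Int.ediv_mul_cancel hdvd
        have hqdvd : (a / d) ∣ a := ⟨d, hmul.symm⟩
        have hq1 : 1 ≤ a / d := le_trans hd hdle
        have hvv : a / (a / d) = d := by
          have h2 : a / d * d / (a / d) = d := Int.mul_ediv_cancel_left d (by omega)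
          rw [hmul] at h2
          exact h2
        have huniq : ∀ w, w ∣ a → a / w = d → w = a / d := by
          intro w hw hvw
          have h1 : w * d = a := by rw [← hvw]; exact Int.mul_ediv_cancel' hw
          rw [← h1, Int.mul_ediv_cancel _ (by omega)]
        have hdnot : d ∉ pvS a (d + 1) := by
          intro h
          have := ((pvS_mem a (d + 1) d).mp h).2.2.1
          omega
        have hqnot : a / d ∉ pvS a (d + 1) := by
          intro h
          have := ((pvS_mem a (d + 1) (a / d)).mp h).2.2.2
          rw [hvv] at this
          omega
        have hdmem : d ∈ pvS a d := (pvS_mem a d d).mpr ⟨⟨hd, hdv⟩, hdvd, le_refl d, hdle⟩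
        have hqmem : a / d ∈ pvS a d := by
          refine (pvS_mem a d (a / d)).mpr ⟨⟨hq1, Int.le_of_dvd (by omega) hqdvd⟩, hqdvd, hdle, ?_⟩
          rw [hvv]
        have hstep : ∀ w, w ∈ pvS a d ↔ (w = d ∨ w = a / d ∨ w ∈ pvS a (d + 1)) := by
          intro w
          constructor
          · intro h
            obtain ⟨⟨hw1, hwv⟩, hwdvd, hw2, hw3⟩ := (pvS_mem a d w).mp h
            by_cases he1 : w = d
            · exact Or.inl he1
            by_cases he2 : w = a / d
            · exact Or.inr (Or.inl he2)
            refine Or.inr (Or.inr ((pvS_mem a (d + 1) w).mpr ⟨⟨hw1, hwv⟩, hwdvd, by omega, ?_⟩))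
            have : a / w ≠ d := fun hc => he2 (huniq w hwdvd hc)
            omega
          · intro h
            rcases h with h | h | h
            · rwa [h]
            · rwa [h]
            · obtain ⟨hw0, hwdvd, hw2, hw3⟩ := (pvS_mem a (d + 1) w).mp h
              exact (pvS_mem a d w).mpr ⟨hw0, hwdvd, by omega, by omega⟩
        have hih : ∀ t : Int, pvSqrtLoopB cnt m MOD v a fuel (d + 1) t
            = t + ∑ w ∈ pvS a (d + 1), (pvg cnt m MOD v w + pvg cnt m MOD v (-w)) :=
          fun t => ih (d + 1) t (by omega) (by omega)
        simp only [hm0, hq, if_true]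
        by_cases hcase : a / d = d
        · -- perfect-square step: only one new divisor
          have hset : pvS a d = insert d (pvS a (d + 1)) := by
            apply Finset.ext
            intro w
            rw [Finset.mem_insert, hstep w, hcase]
            tauto
          rw [if_pos hcase]
          simp only [List.foldl_cons, List.foldl_nil, pvAddDiv_eq]
          rw [hih, hset, Finset.sum_insert hdnot]
          ring
        · -- two new divisors d and a / d
          have hset : pvS a d = insert d (insert (a / d) (pvS a (d + 1))) := by
            apply Finset.ext
            intro w
            rw [Finset.mem_insert, Finset.mem_insert, hstep w]
          have hdnot' : d ∉ insert (a / d) (pvS a (d + 1)) := by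
            rw [Finset.mem_insert]
            rintro (h | h)
            · exact hcase h.symm
            · exact hdnot h
          rw [if_neg hcase]
          simp only [List.foldl_cons, List.foldl_nil, pvAddDiv_eq]
          rw [hih, hset, Finset.sum_insert hdnot', Finset.sum_insert hqnot]
          ring
      · -- d does not divide a: nothing is added and the divisor set is unchanged
        have hm0 : PySem.Int.mod a d ≠ 0 :=
          fun h => hdvd ((PySem.Int.mod_eq_zero_iff_dvd a d).mp h)
        have hset : pvS a d = pvS a (d + 1) := by
          apply Finset.ext
          intro w
          rw [pvS_mem, pvS_mem]
          constructor
          · rintro ⟨hw0, hwdvd, hw2, hw3⟩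
            have hne1 : w ≠ d := fun hc => hdvd (hc ▸ hwdvd)
            have hne2 : a / w ≠ d := by
              intro hc
              have h1 : w * d = a := by rw [← hc]; exact Int.mul_ediv_cancel' hwdvd
              exact hdvd ⟨w, by rw [← h1]; ring⟩
            exact ⟨hw0, hwdvd, by omega, by omega⟩
          · rintro ⟨hw0, hwdvd, hw2, hw3⟩
            exact ⟨hw0, hwdvd, by omega, by omega⟩
        have hih := ih (d + 1) total (by omega) (by omega)
        rw [if_neg hm0, hih, hset]
    · -- guard fails: no divisor of a remains at or beyond d
      rw [if_neg hdd, pvS_empty a d hd hdd]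
      simp

-- the counter's conditional contribution is count * pvF (for an exact divisor x of v)
lemma pvg_counter (m : PySem.Dict Int Int) (MOD v : Int) (P : List Int) (x : Int)
    (hx : x ≠ 0) (hdvd : x ∣ v) :
    pvg (PySem.Dict.counter P) m MOD v x = (P.count x : Int) * pvF m MOD v x := by
  unfold pvg
  rw [pvFloordiv_exact v x hx hdvd]
  by_cases h : (PySem.Dict.counter P).contains x = true
  · rw [if_pos h, PySem.Dict.getD_counter]
    rfl
  · rw [if_neg h]
    rw [PySem.Dict.contains_counter] at h
    have hw : x ∉ P := by simpa using h
    rw [List.count_eq_zero.mpr hw]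
    simp

-- A's list sum over the prefix equals the signed-divisor-pair sum weighted by multiplicities
lemma pvSum_signed (m : PySem.Dict Int Int) (MOD v : Int) (hv : v ≠ 0) :
    ∀ (P : List Int),
      (P.map (fun x => if x ∣ v then pvF m MOD v x else 0)).sum
        = ∑ w ∈ pvS (if v < 0 then -v else v) 1,
            ((P.count w : Int) * pvF m MOD v w + (P.count (-w) : Int) * pvF m MOD v (-w)) := by
  set a : Int := if v < 0 then -v else v with hadef
  have ha1 : 1 ≤ a := by rw [hadef]; split_ifs <;> omega
  have hdviff : ∀ x : Int, x ∣ a ↔ x ∣ v := by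
    intro x
    rw [hadef]
    split_ifs
    · exact dvd_neg
    · exact Iff.rfl
  have hmem : ∀ w, w ∈ pvS a 1 ↔ w ∣ a ∧ 1 ≤ w := by
    intro w
    rw [pvS_mem]
    constructor
    · rintro ⟨⟨h1, _⟩, hd, _, _⟩; exact ⟨hd, h1⟩
    · rintro ⟨hd, h1⟩
      have hle : w ≤ a := Int.le_of_dvd (by omega) hd
      have h1w : (1 : Int) * w ≤ a := by rw [one_mul]; exact hle
      exact ⟨⟨h1, hle⟩, hd, h1, (Int.le_ediv_iff_mul_le (by omega)).mpr h1w⟩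
  intro P
  induction P with
  | nil =>
    simp
  | cons x P ih =>
    simp only [List.map_cons, List.sum_cons]
    rw [ih]
    have hsplit : ∀ w ∈ pvS a 1,
        (((x :: P).count w : Int) * pvF m MOD v w + ((x :: P).count (-w) : Int) * pvF m MOD v (-w))
          = ((P.count w : Int) * pvF m MOD v w + (P.count (-w) : Int) * pvF m MOD v (-w))
            + (if x = w then pvF m MOD v w else 0) + (if x = -w then pvF m MOD v (-w) else 0) := by
      intro w hwS
      have hw1 : 1 ≤ w := ((hmem w).mp hwS).2
      rw [List.count_cons, List.count_cons]
      simp only [beq_iff_eq]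
      by_cases h1 : x = w
      · rw [if_pos h1, if_neg (by omega : ¬ x = -w), if_pos h1, if_neg (by omega : ¬ x = -w)]
        push_cast
        ring
      · by_cases h2 : x = -w
        · rw [if_neg h1, if_pos h2, if_neg h1, if_pos h2]
          push_cast
          ring
        · rw [if_neg h1, if_neg h2, if_neg h1, if_neg h2]
          push_cast
          ring
    rw [Finset.sum_congr rfl hsplit]
    simp only [Finset.sum_add_distrib]
    have he1 : (∑ w ∈ pvS a 1, if x = w then pvF m MOD v w else 0)
        = if x ∈ pvS a 1 then pvF m MOD v x else 0 := Finset.sum_ite_eq (pvS a 1) x _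
    have he2 : (∑ w ∈ pvS a 1, if x = -w then pvF m MOD v (-w) else 0)
        = if -x ∈ pvS a 1 then pvF m MOD v (-(-x)) else 0 := by
      rw [← Finset.sum_ite_eq (pvS a 1) (-x) (fun w => pvF m MOD v (-w))]
      apply Finset.sum_congr rfl
      intro w _
      congr 1
      apply propext
      constructor <;> intro h <;> omega
    rw [he1, he2, neg_neg]
    by_cases hd : x ∣ v
    · have hx0 : x ≠ 0 := by rintro rfl; exact hv (zero_dvd_iff.mp hd)
      rw [if_pos hd]
      by_cases hxp : 1 ≤ x
      · rw [if_pos ((hmem x).mpr ⟨(hdviff x).mpr hd, hxp⟩),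
          if_neg (fun h => by have := ((hmem (-x)).mp h).2; omega)]
        ring
      · rw [if_neg (fun h => by have := ((hmem x).mp h).2; omega),
          if_pos ((hmem (-x)).mpr ⟨(hdviff (-x)).mpr (neg_dvd.mpr hd), by omega⟩)]
        ring
    · rw [if_neg hd,
        if_neg (fun h => hd ((hdviff x).mp ((hmem x).mp h).1)),
        if_neg (fun h => hd (neg_neg x ▸ (neg_dvd.mpr ((hdviff (-x)).mp ((hmem (-x)).mp h).1))))]
      ring

-- ===== VERDICT (by name: the statement is the Claim_ definition above) =====
theorem calculate_spec : Claim_equal_calculate := by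
  intro idx arr mem _ hpre
  obtain ⟨hlo, hhi, hbr⟩ := hpre
  unfold Spec_calculate calculate calculate_alt
  have hjlt : pvJ idx arr < arr.length := by
    simp only [pvJ]
    split_ifs <;> omega
  have hj : PySem.List.pyIdx? arr.length idx = some (pvJ idx arr) := by
    simp only [PySem.List.pyIdx?, pvJ]
    split_ifs <;> simp only [Option.some.injEq] <;> omega
  have hget : PySem.List.pyGet? arr idx = some arr[pvJ idx arr] := by
    simp only [PySem.List.pyGet?, hj, Option.bind_some]
    exact List.getElem?_eq_getElem hjlt
  have hv : arr.getD (pvJ idx arr) 0 = arr[pvJ idx arr] := by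
    simp [List.getD_eq_getElem?_getD, List.getElem?_eq_getElem hjlt]
  rw [hv] at hbr
  simp only [hget]
  set m := PySem.Dict.mk mem with hm
  set v := arr[pvJ idx arr] with hvdef
  by_cases hc : m.contains v = true
  · -- already memoized: both return the stored value
    have hs : (m.get? v).isSome = true := by
      rw [← PySem.Dict.contains_eq_isSome_get?]; exact hc
    obtain ⟨r, hr⟩ : ∃ r, m.get? v = some r := by
      cases h' : m.get? v
      · rw [h'] at hs; simp at hs
      · exact ⟨_, rfl⟩
    simp only [hc, hr, Bool.true_eq_false]
    simp [PySem.Dict.getD_eq_get?_getD, hr]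
  · -- compute branch
    have hcf : m.contains v = false := by simpa using hc
    have hget? : m.get? v = none := by
      have := PySem.Dict.contains_eq_isSome_get? m v
      rw [hcf] at this
      cases h' : m.get? v
      · rfl
      · rw [h'] at this; simp at this
    have hnm : ¬ (m.get? v).isSome = true := by simp [hget?]
    have hall : ∀ x ∈ arr.take idx.toNat, x ≠ 0 := by
      rcases hbr with hbr | hbr
      · exact absurd hbr hnm
      · exact fun x hx => (hbr x hx).1
    simp only [hcf, hget?, if_true]
    have hA : (PySem.List.pyRange 0 idx 1).foldl
        (fun total i =>
          match PySem.List.pyGet? arr i with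
          | none => total
          | some x => pvBodyA m 1000000007 v total x) 1
        = (arr.take idx.toNat).foldl (pvBodyA m 1000000007 v) 1 :=
      pvFoldPrefix arr idx (by omega) (pvBodyA m 1000000007 v) 1
    rw [hA]
    by_cases hv0 : v = 0
    · -- arr[idx] = 0: B's dedicated loop equals A's loop on nonzero prefix elements
      rw [if_pos hv0]
      rw [pvFoldPrefix arr idx (by omega) _ 1, hv0]
      rw [pvFoldZero m 1000000007 (arr.take idx.toNat) 1 hall]
    · -- arr[idx] ≠ 0: divisor-pair enumeration against the prefix counter
      rw [if_neg hv0]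
      rw [pvFoldPrefix arr idx (by omega)
        (fun c x => PySem.Dict.insert c x (PySem.Dict.getD c x 0 + 1)) PySem.Dict.empty]
      rw [PySem.Dict.foldl_insert_getD_add_one_eq_counter (arr.take idx.toNat)]
      set a : Int := if v < 0 then -v else v with hadef
      have ha1 : 1 ≤ a := by rw [hadef]; split_ifs <;> omega
      have hB : pvSqrtLoopB (PySem.Dict.counter (arr.take idx.toNat)) m 1000000007 v a (a + 1).toNat 1 1
          = 1 + ∑ w ∈ pvS a 1,
              (pvg (PySem.Dict.counter (arr.take idx.toNat)) m 1000000007 v w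
               + pvg (PySem.Dict.counter (arr.take idx.toNat)) m 1000000007 v (-w)) :=
        pvSqrtLoopB_sum (PySem.Dict.counter (arr.take idx.toNat)) m 1000000007 v a ha1
          (a + 1).toNat 1 1 (by omega) (by omega)
      rw [hB,
        pvFoldA_sum m 1000000007 v (arr.take idx.toNat) 1 hall,
        pvSum_signed m 1000000007 v hv0 (arr.take idx.toNat), ← hadef]
      have hsum : (∑ w ∈ pvS a 1,
            (pvg (PySem.Dict.counter (arr.take idx.toNat)) m 1000000007 v w
             + pvg (PySem.Dict.counter (arr.take idx.toNat)) m 1000000007 v (-w)))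
          = ∑ w ∈ pvS a 1,
            (((arr.take idx.toNat).count w : Int) * pvF m 1000000007 v w
             + ((arr.take idx.toNat).count (-w) : Int) * pvF m 1000000007 v (-w)) := by
        apply Finset.sum_congr rfl
        intro w hw
        have hwmem : w ∣ a ∧ 1 ≤ w := by
          have := (pvS_mem a 1 w).mp hw
          exact ⟨this.2.1, this.1.1⟩
        have hwdvd : w ∣ v := by
          rcases hwmem with ⟨hwa, hw1⟩
          rw [hadef] at hwa
          by_cases hvn : v < 0
          · rw [if_pos hvn] at hwa; exact dvd_neg.mp hwa
          · rw [if_neg hvn] at hwa; exact hwa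
        have hw1 := hwmem.2
        rw [pvg_counter m 1000000007 v (arr.take idx.toNat) w (by omega) hwdvd,
          pvg_counter m 1000000007 v (arr.take idx.toNat) (-w) (by omega) (neg_dvd.mpr hwdvd)]
      rw [hsum]
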